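-- pv_equiv track=rewrite | github.com/FelipeSilvestre04/IC | Algoritimos/Reinforcemente Learning/Algoritimos/Antigo/Simples/Teste/PPO_66_euler.py | calculate_max_values
-- ===== SOURCE A (Python) =====
-- def calculate_max_values(features):
--     """Calcula os valores máximos para normalização com base nas características fornecidas."""
--     max_values = [
--         max(f[0] for f in features),
--         max(f[1] for f in features),
--         max(f[2] for f in features),
--         max(f[3] for f in features),
--         max(f[4] for f in features),
--         max(f[5] for f in features),
--         max(f[6] for f in features)
--     ]
--     return max_values
-- ===== SOURCE B (Python) =====
-- def calculate_max_values(features):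
--     """Calcula os valores máximos para normalização com base nas características fornecidas."""
--     running = list(features[0][:7])
--     for f in features[1:]:
--         for i in range(7):
--             if f[i] > running[i]:
--                 running[i] = f[i]
--     return running
-- ===== Notes on version B (the rewrite author's own statement) =====
-- stated objective: alternative
-- what changed: Seven separate max() passes over the whole list are replaced by a single pass maintaining seven running maxima seeded from the first row.
-- outside the precondition, e.g. on calculate_max_values([]): A raises ValueError, B raises IndexError
import Mathlib
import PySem

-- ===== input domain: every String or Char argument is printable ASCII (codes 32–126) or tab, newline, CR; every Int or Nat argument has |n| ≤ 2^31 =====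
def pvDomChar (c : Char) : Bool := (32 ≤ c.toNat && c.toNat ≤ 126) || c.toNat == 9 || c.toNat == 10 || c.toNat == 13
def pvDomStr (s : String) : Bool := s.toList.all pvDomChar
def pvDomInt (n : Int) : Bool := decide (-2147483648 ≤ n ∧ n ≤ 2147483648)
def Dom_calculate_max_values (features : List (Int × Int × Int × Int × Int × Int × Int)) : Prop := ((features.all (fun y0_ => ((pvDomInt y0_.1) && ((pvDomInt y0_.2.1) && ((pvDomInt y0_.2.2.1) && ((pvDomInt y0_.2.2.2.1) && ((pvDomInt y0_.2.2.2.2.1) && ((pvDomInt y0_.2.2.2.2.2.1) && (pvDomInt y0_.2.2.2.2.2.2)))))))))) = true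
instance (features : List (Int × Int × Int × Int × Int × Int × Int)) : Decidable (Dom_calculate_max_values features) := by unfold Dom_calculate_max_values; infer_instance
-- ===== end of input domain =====

-- B replaces seven whole-list max() passes by one pass keeping seven running maxima (objective: alternative decomposition).

-- ===== PORT A =====
-- Python's max(gen) raises ValueError on an empty list; Pre_ excludes that, the
-- .getD 0 default is never reached under Pre_.
def calculate_max_values (features : List (Int × Int × Int × Int × Int × Int × Int)) : List Int :=
  [ (PySem.List.max? (features.map (·.1)) (fun x => x)).getD 0,
    (PySem.List.max? (features.map (·.2.1)) (fun x => x)).getD 0,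
    (PySem.List.max? (features.map (·.2.2.1)) (fun x => x)).getD 0,
    (PySem.List.max? (features.map (·.2.2.2.1)) (fun x => x)).getD 0,
    (PySem.List.max? (features.map (·.2.2.2.2.1)) (fun x => x)).getD 0,
    (PySem.List.max? (features.map (·.2.2.2.2.2.1)) (fun x => x)).getD 0,
    (PySem.List.max? (features.map (·.2.2.2.2.2.2)) (fun x => x)).getD 0 ]

-- ===== PORT B =====
-- One row of running maxima, updated with strict '>' as in Source B.
def pvUpd (m f : Int × Int × Int × Int × Int × Int × Int) : Int × Int × Int × Int × Int × Int × Int :=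
  ( if f.1 > m.1 then f.1 else m.1,
    if f.2.1 > m.2.1 then f.2.1 else m.2.1,
    if f.2.2.1 > m.2.2.1 then f.2.2.1 else m.2.2.1,
    if f.2.2.2.1 > m.2.2.2.1 then f.2.2.2.1 else m.2.2.2.1,
    if f.2.2.2.2.1 > m.2.2.2.2.1 then f.2.2.2.2.1 else m.2.2.2.2.1,
    if f.2.2.2.2.2.1 > m.2.2.2.2.2.1 then f.2.2.2.2.2.1 else m.2.2.2.2.2.1,
    if f.2.2.2.2.2.2 > m.2.2.2.2.2.2 then f.2.2.2.2.2.2 else m.2.2.2.2.2.2 )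

-- Source B indexes features[0]; on the empty list it raises IndexError (outside Pre_), here [].
def calculate_max_values_alt (features : List (Int × Int × Int × Int × Int × Int × Int)) : List Int :=
  match features with
  | [] => []
  | f0 :: rest =>
    let r := rest.foldl pvUpd f0
    [r.1, r.2.1, r.2.2.1, r.2.2.2.1, r.2.2.2.2.1, r.2.2.2.2.2.1, r.2.2.2.2.2.2]

-- ===== PRECONDITION & SPEC =====
-- A raises ValueError (max of an empty sequence) on the empty list; Pre_ excludes exactly that.
def Pre_calculate_max_values (features : List (Int × Int × Int × Int × Int × Int × Int)) : Prop :=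
  features ≠ []
instance (features : List (Int × Int × Int × Int × Int × Int × Int)) : Decidable (Pre_calculate_max_values features) := by unfold Pre_calculate_max_values; infer_instance

def pvWitness_calculate_max_values : (List (Int × Int × Int × Int × Int × Int × Int)) :=
  [(1, 2, 3, 4, 5, 6, 7), (0, 9, -1, 4, 2, 6, 8)]

def Spec_calculate_max_values (features : List (Int × Int × Int × Int × Int × Int × Int)) (out : List Int) : Prop := out = calculate_max_values_alt features
instance (features : List (Int × Int × Int × Int × Int × Int × Int)) (out : List Int) : Decidable (Spec_calculate_max_values features out) := by unfold Spec_calculate_max_values; infer_instance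

-- ===== CLAIM (what is proved, stated in full; the proofs are below) =====
def Claim_equal_calculate_max_values : Prop := ∀ (features : List (Int × Int × Int × Int × Int × Int × Int)), Dom_calculate_max_values features → Pre_calculate_max_values features → Spec_calculate_max_values features (calculate_max_values features)

-- ===== LEMMAS AND PROOFS =====

theorem pvUpd_eq_max (m f : Int × Int × Int × Int × Int × Int × Int) :
    pvUpd m f = (max m.1 f.1, max m.2.1 f.2.1, max m.2.2.1 f.2.2.1, max m.2.2.2.1 f.2.2.2.1,
      max m.2.2.2.2.1 f.2.2.2.2.1, max m.2.2.2.2.2.1 f.2.2.2.2.2.1, max m.2.2.2.2.2.2 f.2.2.2.2.2.2) := by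
  unfold pvUpd
  refine Prod.ext ?_ (Prod.ext ?_ (Prod.ext ?_ (Prod.ext ?_ (Prod.ext ?_ (Prod.ext ?_ ?_))))) <;>
    simp <;> split_ifs <;> omega

theorem foldl_pvUpd (rest : List (Int × Int × Int × Int × Int × Int × Int))
    (m : Int × Int × Int × Int × Int × Int × Int) :
    rest.foldl pvUpd m =
      ( (rest.map (·.1)).foldl max m.1,
        (rest.map (·.2.1)).foldl max m.2.1,
        (rest.map (·.2.2.1)).foldl max m.2.2.1,
        (rest.map (·.2.2.2.1)).foldl max m.2.2.2.1,
        (rest.map (·.2.2.2.2.1)).foldl max m.2.2.2.2.1,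
        (rest.map (·.2.2.2.2.2.1)).foldl max m.2.2.2.2.2.1,
        (rest.map (·.2.2.2.2.2.2)).foldl max m.2.2.2.2.2.2 ) := by
  induction rest generalizing m with
  | nil => rfl
  | cons f t ih => simp [List.foldl, ih, pvUpd_eq_max]

-- ===== VERDICT (by name: the statement is the Claim_ definition above) =====
theorem calculate_max_values_spec : Claim_equal_calculate_max_values := by
  intro features _ hpre
  unfold Spec_calculate_max_values
  match features with
  | [] => exact absurd rfl hpre
  | f0 :: rest =>
    simp only [calculate_max_values, calculate_max_values_alt, List.map_cons,
      PySem.List.max?_id_cons, Option.getD_some, foldl_pvUpd]
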